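-- pv_equiv track=rewrite | github.com/AliNormohammmadzadeh/DSA | Data structure & Algorithm/findIndexofZeroToFillMax.py | findIndexofZero
-- ===== SOURCE A (Python) =====
-- def findIndexofZero(nums):
--     max_count = 0
--     max_index = -1
--     prev_zero_index = -1
--     count = 0
--     for i in range(len(nums)):
--         if nums[i] == 1:
--             count += 1
--         else :
--             count = i - prev_zero_index
--             prev_zero_index = i
--
--         if count > max_count:
--             max_count = count
--             max_index = prev_zero_index
--
--     return max_index
-- ===== SOURCE B (Python) =====
-- def findIndexofZero(nums):
--     n = len(nums)
--     max_count = 0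
--     max_index = -1
--     for i in range(n):
--         if nums[i] != 1:
--             left = 0
--             j = i - 1
--             while j >= 0 and nums[j] == 1:
--                 left += 1
--                 j -= 1
--             right = 0
--             j = i + 1
--             while j < n and nums[j] == 1:
--                 right += 1
--                 j += 1
--             score = left + right + 1
--             if score > max_count:
--                 max_count = score
--                 max_index = i
--     return max_index
-- ===== Notes on version B (the rewrite author's own statement) =====
-- stated objective: alternative
-- what changed: Replaces A's single accumulating-counter pass (count/prev_zero_index state) with an independent per-break-point computation: for every non-1 element, scan the run of consecutive 1s on each side and keep the first index maximizing left+right+1.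
import Mathlib
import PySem

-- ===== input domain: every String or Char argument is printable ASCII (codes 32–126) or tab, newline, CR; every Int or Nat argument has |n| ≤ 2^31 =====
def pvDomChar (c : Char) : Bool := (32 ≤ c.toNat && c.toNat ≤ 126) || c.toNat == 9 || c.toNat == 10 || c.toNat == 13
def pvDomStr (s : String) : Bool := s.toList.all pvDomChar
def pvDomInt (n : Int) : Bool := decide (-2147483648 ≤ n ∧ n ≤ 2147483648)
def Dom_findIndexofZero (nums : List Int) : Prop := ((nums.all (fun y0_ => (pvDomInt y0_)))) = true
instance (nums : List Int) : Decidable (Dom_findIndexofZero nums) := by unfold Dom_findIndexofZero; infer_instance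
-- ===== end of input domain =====

-- B replaces A's single accumulating-counter pass with a per-break-point neighbor scan
-- (count the run of 1s on each side of every non-1 element); objective: alternative, same cost.

-- ===== PORT A =====
-- A's loop state: (max_count, max_index, prev_zero_index, count); the for loop over
-- range(len(nums)) with nums[i] becomes structural recursion over the list with index i.
def stepA (st : Int × Int × Int × Int) (i : Nat) (v : Int) : Int × Int × Int × Int :=
  let c1 := if v = 1 then st.2.2.2 + 1 else (i : Int) - st.2.2.1
  let pz1 := if v = 1 then st.2.2.1 else (i : Int)
  if c1 > st.1 then (c1, pz1, pz1, c1) else (st.1, st.2.1, pz1, c1)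

def loopA : List Int → Nat → Int × Int × Int × Int → Int × Int × Int × Int
  | [], _, st => st
  | v :: rest, i, st => loopA rest (i + 1) (stepA st i v)

def findIndexofZero (nums : List Int) : Int :=
  (loopA nums 0 (0, -1, -1, 0)).2.1

-- ===== PORT B =====
-- the backwards while loop counting nums[j]==1 is exactly takeWhile on the reversed prefix,
-- the forwards one exactly takeWhile on the suffix (exact on all inputs).
def onesLen (l : List Int) : Nat := (l.takeWhile (fun y => y == 1)).length

def onesLeft (nums : List Int) (i : Nat) : Int := (onesLen (nums.take i).reverse : Int)

def onesRight (nums : List Int) (i : Nat) : Int := (onesLen (nums.drop (i + 1)) : Int)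

def loopB (nums : List Int) : List Int → Nat → Int × Int → Int × Int
  | [], _, st => st
  | v :: rest, i, st =>
      loopB nums rest (i + 1)
        (if v ≠ 1 then
           let score := onesLeft nums i + onesRight nums i + 1
           if score > st.1 then (score, (i : Int)) else st
         else st)

def findIndexofZero_alt (nums : List Int) : Int :=
  (loopB nums nums 0 (0, -1)).2

-- ===== PRECONDITION & SPEC =====
def Spec_findIndexofZero (nums : List Int) (out : Int) : Prop := out = findIndexofZero_alt nums
instance (nums : List Int) (out : Int) : Decidable (Spec_findIndexofZero nums out) := by unfold Spec_findIndexofZero; infer_instance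

-- ===== CLAIM (what is proved, stated in full; the proofs are below) =====
def Claim_equal_findIndexofZero : Prop := ∀ (nums : List Int), Dom_findIndexofZero nums → Spec_findIndexofZero nums (findIndexofZero nums)

-- ===== LEMMAS AND PROOFS =====

lemma onesLen_cons (v : Int) (l : List Int) :
    onesLen (v :: l) = if v = 1 then onesLen l + 1 else 0 := by
  by_cases h : v = 1 <;> simp [onesLen, h]

lemma onesLen_ones (l : List Int) (h : ∀ y ∈ l, y = 1) : onesLen l = l.length := by
  induction l with
  | nil => rfl
  | cons a l ih =>
      have ha : a = 1 := h a (by simp)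
      simp [onesLen_cons, ha, ih (fun y hy => h y (by simp [hy]))]

lemma onesLen_ones_append (l1 : List Int) (x : Int) (l2 : List Int)
    (h1 : ∀ y ∈ l1, y = 1) (hx : x ≠ 1) : onesLen (l1 ++ x :: l2) = l1.length := by
  induction l1 with
  | nil => simp [onesLen_cons, hx]
  | cons a l ih =>
      have ha : a = 1 := h1 a (by simp)
      simp [onesLen_cons, ha, ih (fun y hy => h1 y (by simp [hy]))]

lemma drop_len_succ (pre : List Int) (v : Int) (rest : List Int) :
    (pre ++ v :: rest).drop (pre.length + 1) = rest := by
  simp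

-- the invariant tying A's running state to B's: either no break has been seen yet
-- (phase 0), or the last break splits the processed prefix as l1 ++ x :: l2 and B's
-- state anticipates the pending run c plus the 1s immediately ahead in rest.
def InvAB (pre rest : List Int) (mc mi pz c m idx : Int) : Prop :=
  ((∀ y ∈ pre, y = 1) ∧ pz = -1 ∧ c = (pre.length : Int) ∧ mc = c ∧ mi = -1 ∧ m = 0 ∧ idx = -1)
  ∨ (∃ l1 x l2, pre = l1 ++ x :: l2 ∧ pz = (l1.length : Int) ∧ x ≠ 1 ∧ (∀ y ∈ l2, y = 1) ∧
      c ≤ mc ∧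
      (c + (onesLen rest : Int) > mc → m = c + (onesLen rest : Int) ∧ idx = pz) ∧
      (¬ c + (onesLen rest : Int) > mc → m = mc ∧ idx = mi))

lemma master (rest : List Int) : ∀ (pre : List Int) (mc mi pz c m idx : Int),
    InvAB pre rest mc mi pz c m idx →
    (loopA rest pre.length (mc, mi, pz, c)).2.1 = (loopB (pre ++ rest) rest pre.length (m, idx)).2 := by
  induction rest with
  | nil =>
      intro pre mc mi pz c m idx hInv
      rcases hInv with ⟨_, _, _, _, hmi, _, hidx⟩ | ⟨l1, x, l2, _, _, _, _, hle, _, hng⟩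
      · simp [loopA, loopB, hmi, hidx]
      · have h0 : (onesLen ([] : List Int) : Int) = 0 := rfl
        have := hng (by rw [h0]; omega)
        simp [loopA, loopB, this.2]
  | cons v rest' ih =>
      intro pre mc mi pz c m idx hInv
      have happ : pre ++ v :: rest' = (pre ++ [v]) ++ rest' := by simp
      have hlen : pre.length + 1 = (pre ++ [v]).length := by simp
      have hunfA : loopA (v :: rest') pre.length (mc, mi, pz, c)
          = loopA rest' (pre.length + 1) (stepA (mc, mi, pz, c) pre.length v) := rfl
      by_cases hv : v = 1
      · -- v = 1: A bumps count, B skips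
        have hunfB : loopB (pre ++ v :: rest') (v :: rest') pre.length (m, idx)
            = loopB (pre ++ v :: rest') rest' (pre.length + 1) (m, idx) := by
          simp [loopB, hv]
        rcases hInv with ⟨hones, hpz, hc, hmc, hmi, hm, hidx⟩ | ⟨l1, x, l2, hpre, hpz, hx, h2, hle, hgt, hng⟩
        · -- phase 0 stays phase 0
          have hstep : stepA (mc, mi, pz, c) pre.length v = (c + 1, pz, pz, c + 1) := by
            simp only [stepA, if_pos hv]
            rw [if_pos (by omega : c + 1 > mc)]
          rw [hunfA, hunfB, hstep, happ, hlen]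
          refine ih (pre ++ [v]) _ _ _ _ _ _ (Or.inl ⟨?_, hpz, by omega, rfl, hpz.trans hmi.symm ▸ hmi, hm, hidx⟩)
          intro y hy
          rcases List.mem_append.1 hy with h | h
          · exact hones y h
          · simp at h; omega
        · -- phase 1 stays phase 1 (l2 grows by one 1)
          have ht : (onesLen (v :: rest') : Int) = (onesLen rest' : Int) + 1 := by
            simp [onesLen_cons, hv]
          have hsplit : pre ++ [v] = l1 ++ x :: (l2 ++ [v]) := by simp [hpre]
          have h2' : ∀ y ∈ l2 ++ [v], y = 1 := by
            intro y hy
            rcases List.mem_append.1 hy with h | h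
            · exact h2 y h
            · simp at h; omega
          rw [hunfA, hunfB, happ, hlen]
          by_cases hcmp : c + 1 > mc
          · have hstep : stepA (mc, mi, pz, c) pre.length v = (c + 1, pz, pz, c + 1) := by
              simp only [stepA, if_pos hv]
              rw [if_pos hcmp]
            rw [hstep]
            refine ih (pre ++ [v]) _ _ _ _ _ _ (Or.inr ⟨l1, x, l2 ++ [v], hsplit, hpz, hx, h2', le_refl _, ?_, ?_⟩)
            · intro hgt'
              have := hgt (by omega)
              exact ⟨by omega, this.2⟩
            · intro hng'
              have := hgt (by omega)
              exact ⟨by omega, by omega⟩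
          · have hstep : stepA (mc, mi, pz, c) pre.length v = (mc, mi, pz, c + 1) := by
              simp only [stepA, if_pos hv]
              rw [if_neg hcmp]
            rw [hstep]
            refine ih (pre ++ [v]) _ _ _ _ _ _ (Or.inr ⟨l1, x, l2 ++ [v], hsplit, hpz, hx, h2', by omega, ?_, ?_⟩)
            · intro hgt'
              have := hgt (by omega)
              exact ⟨by omega, this.2⟩
            · intro hng'
              exact hng (by omega)
      · -- v ≠ 1: a break point at index pre.length
        have hright : onesRight (pre ++ v :: rest') pre.length = (onesLen rest' : Int) := by
          rw [onesRight, drop_len_succ]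
        have htake : (pre ++ v :: rest').take pre.length = pre := by
          simp
        have ht0 : (onesLen (v :: rest') : Int) = 0 := by simp [onesLen_cons, hv]
        have hunfB : loopB (pre ++ v :: rest') (v :: rest') pre.length (m, idx)
            = loopB (pre ++ v :: rest') rest' (pre.length + 1)
                (if onesLeft (pre ++ v :: rest') pre.length + onesRight (pre ++ v :: rest') pre.length + 1 > m
                 then (onesLeft (pre ++ v :: rest') pre.length + onesRight (pre ++ v :: rest') pre.length + 1, (pre.length : Int))
                 else (m, idx)) := by
          simp [loopB, hv]
        rcases hInv with ⟨hones, hpz, hc, hmc, hmi, hm, hidx⟩ | ⟨l1, x, l2, hpre, hpz, hx, h2, hle, hgt, hng⟩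
        · -- phase 0 → phase 1, first break: both sides surely update
          have hleft : onesLeft (pre ++ v :: rest') pre.length = (pre.length : Int) := by
            rw [onesLeft, htake, onesLen_ones _ (by intro y hy; exact hones y (List.mem_reverse.1 hy))]
            simp
          have hcmp : (pre.length : Int) - pz > mc := by omega
          have hstep : stepA (mc, mi, pz, c) pre.length v
              = ((pre.length : Int) - pz, (pre.length : Int), (pre.length : Int), (pre.length : Int) - pz) := by
            simp only [stepA, if_neg hv]
            rw [if_pos hcmp]
          have hc1 : (pre.length : Int) - pz = (pre.length : Int) + 1 := by omega
          have hscmp : onesLeft (pre ++ v :: rest') pre.length + onesRight (pre ++ v :: rest') pre.length + 1 > m := by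
            rw [hleft, hright, hm]; positivity
          rw [hunfA, hunfB, hstep, hc1, if_pos hscmp, hleft, hright, happ, hlen]
          refine ih (pre ++ [v]) _ _ _ _ _ _ (Or.inr ⟨pre, v, [], by simp, by simp, hv, by simp, le_refl _, ?_, ?_⟩)
          · intro hgt'
            constructor <;> [omega; simp]
          · intro hng'
            constructor <;> [omega; simp]
        · -- phase 1 → phase 1 with the new break as last break
          have hleft : onesLeft (pre ++ v :: rest') pre.length = (l2.length : Int) := by
            rw [onesLeft, htake, hpre]
            have : (l1 ++ x :: l2).reverse = l2.reverse ++ x :: l1.reverse := by simp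
            rw [this, onesLen_ones_append _ _ _ (by intro y hy; exact h2 y (List.mem_reverse.1 hy)) hx]
            simp
          have hilen : (pre.length : Int) = (l1.length : Int) + 1 + (l2.length : Int) := by
            rw [hpre]; push_cast [List.length_append, List.length_cons]; ring
          have hmidx : m = mc ∧ idx = mi := hng (by omega)
          have hc1 : (pre.length : Int) - pz = (l2.length : Int) + 1 := by omega
          rw [hunfA, hunfB, hleft, hright, happ, hlen]
          by_cases hcmp : (l2.length : Int) + 1 + (onesLen rest' : Int) > mc
          · -- B updates; A updates iff its (partial) new count already exceeds
            rw [if_pos (by omega : (l2.length : Int) + (onesLen rest' : Int) + 1 > m)]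
            by_cases hAcmp : (pre.length : Int) - pz > mc
            · have hstep : stepA (mc, mi, pz, c) pre.length v
                  = ((pre.length : Int) - pz, (pre.length : Int), (pre.length : Int), (pre.length : Int) - pz) := by
                simp only [stepA, if_neg hv]
                rw [if_pos hAcmp]
              rw [hstep, hc1]
              refine ih (pre ++ [v]) _ _ _ _ _ _ (Or.inr ⟨pre, v, [], by simp, by simp, hv, by simp, le_refl _, ?_, ?_⟩)
              · intro hgt'
                constructor <;> [omega; simp]
              · intro hng'
                constructor <;> [omega; simp]
            · have hstep : stepA (mc, mi, pz, c) pre.length v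
                  = (mc, mi, (pre.length : Int), (pre.length : Int) - pz) := by
                simp only [stepA, if_neg hv]
                rw [if_neg hAcmp]
              rw [hstep, hc1]
              refine ih (pre ++ [v]) _ _ _ _ _ _ (Or.inr ⟨pre, v, [], by simp, by simp, hv, by simp, by omega, ?_, ?_⟩)
              · intro hgt'
                constructor <;> [omega; simp]
              · intro hng'
                omega
          · -- neither side updates
            rw [if_neg (by omega : ¬ (l2.length : Int) + (onesLen rest' : Int) + 1 > m)]
            have hAcmp : ¬ (pre.length : Int) - pz > mc := by omega
            have hstep : stepA (mc, mi, pz, c) pre.length v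
                = (mc, mi, (pre.length : Int), (pre.length : Int) - pz) := by
              simp only [stepA, if_neg hv]
              rw [if_neg hAcmp]
            rw [hstep, hc1, hmidx.1, hmidx.2]
            refine ih (pre ++ [v]) _ _ _ _ _ _ (Or.inr ⟨pre, v, [], by simp, by simp, hv, by simp, by omega, ?_, ?_⟩)
            · intro hgt'
              omega
            · intro hng'
              exact ⟨rfl, rfl⟩

-- ===== VERDICT (by name: the statement is the Claim_ definition above) =====
theorem findIndexofZero_spec : Claim_equal_findIndexofZero := by
  intro nums _
  unfold Spec_findIndexofZero findIndexofZero findIndexofZero_alt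
  have := master nums [] 0 (-1) (-1) 0 0 (-1) (Or.inl ⟨by simp, rfl, rfl, rfl, rfl, rfl, rfl⟩)
  simpa using this
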